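-- pv_equiv track=rewrite | github.com/Terminus-IMRC/qpu-trivial-assembler | qtc.py | complement_num_6
-- ===== SOURCE A (Python) =====
-- def complement_num_6(n):
-- 	if n<0:
-- 		n=-n
-- 		n-=1
-- 		s="%06d"%(int(bin(n)[2:]))
-- 		for i in range(6):
-- 			if s[i]=='0':
-- 				s=s[:i]+'1'+s[i+1:]
-- 			else:
-- 				s=s[:i]+'0'+s[i+1:]
-- 		return int(s, 2)
-- 	else:
-- 		return n
-- ===== SOURCE B (Python) =====
-- def complement_num_6(n):
--     return n % 64 if n < 0 else n
-- ===== Notes on version B (the rewrite author's own statement) =====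
-- stated objective: simpler
-- what changed: B replaces A's binary-string pipeline (zero-padded format via a decimal round-trip, flip six characters one by one with slicing, re-parse base 2) with a single modular reduction n % 64; Pre_ excludes n <= -65, where the 6-bit encoding does not exist and A's value (the top six binary characters of -n-1 flipped) is as arbitrary as B's modular one.
-- outside the precondition, e.g. on complement_num_6(-65): A returns 62, B returns 63; on complement_num_6(-100): A returns 29, B returns 28
import Mathlib
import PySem

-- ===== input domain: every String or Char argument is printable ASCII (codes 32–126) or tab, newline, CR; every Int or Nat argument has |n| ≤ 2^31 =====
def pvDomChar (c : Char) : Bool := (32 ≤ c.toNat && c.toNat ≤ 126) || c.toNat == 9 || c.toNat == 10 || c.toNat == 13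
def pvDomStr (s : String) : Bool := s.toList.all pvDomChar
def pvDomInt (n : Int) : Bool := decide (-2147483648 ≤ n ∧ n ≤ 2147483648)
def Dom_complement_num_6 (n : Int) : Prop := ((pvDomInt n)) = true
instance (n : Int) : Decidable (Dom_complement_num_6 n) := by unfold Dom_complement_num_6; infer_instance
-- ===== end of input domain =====

-- B replaces A's pad/flip-string/re-parse pipeline with one modular reduction (objective: simpler).

-- ===== PORT A =====
-- bin(m)[2:] for m ≥ 0, as a list of '0'/'1' chars (hand port of the builtin `bin`;
-- exact: fuel m suffices because the argument halves each step). bin(0)[2:] = "0".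
def binAux : Nat → Nat → List Char
  | 0, _ => []
  | fuel + 1, m =>
    if m = 0 then []
    else binAux fuel (m / 2) ++ [if m % 2 = 1 then '1' else '0']

def binChars (m : Nat) : List Char := if m = 0 then ['0'] else binAux m m

-- int(s) for a nonempty decimal-digit string (exact on the strings A feeds it)
def parse10 (s : List Char) : Nat := s.foldl (fun a c => 10 * a + (c.toNat - 48)) 0

-- decimal digits of k ≥ 0, MSB first (hand port of decimal formatting; fuel k suffices)
def decAux : Nat → Nat → List Char
  | 0, _ => []
  | fuel + 1, k =>
    if k = 0 then []
    else decAux fuel (k / 10) ++ [Char.ofNat (48 + k % 10)]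

def decChars (k : Nat) : List Char := if k = 0 then ['0'] else decAux k k

-- "%06d" % k for k ≥ 0: left-pad the decimal digits with '0' to width 6
def pad6 (s : List Char) : List Char := List.replicate (6 - s.length) '0' ++ s

-- one loop body: s = s[:i] + flipped(s[i]) + s[i+1:]  (s[i] always exists here: len(s) ≥ 6)
def flipAt (s : List Char) (i : Nat) : List Char :=
  s.take i ++ (match s.drop i with
    | [] => []
    | c :: rest => (if c = '0' then '1' else '0') :: rest)

-- int(s, 2) for a '0'/'1' string (exact on the strings A feeds it)
def parse2 (s : List Char) : Nat := s.foldl (fun a c => 2 * a + (if c = '1' then 1 else 0)) 0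

def complement_num_6 (n : Int) : Int :=
  if n < 0 then
    let m := (-n - 1).toNat                -- n = -n; n -= 1   (nonnegative, so toNat is exact)
    let d := parse10 (binChars m)          -- int(bin(n)[2:])
    let s := pad6 (decChars d)             -- "%06d" % d
    let s' := (List.range 6).foldl flipAt s
    Int.ofNat (parse2 s')                  -- int(s, 2)
  else n

-- ===== PORT B =====
def complement_num_6_alt (n : Int) : Int :=
  if n < 0 then PySem.Int.mod n 64 else n  -- n % 64 (Python floor-mod)

-- ===== PRECONDITION & SPEC =====
-- Pre_ excludes n ≤ -65, where no 6-bit encoding exists and A's returned value (the top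
-- six binary characters of -n-1 flipped, an artefact of its "%06d" padding) is as
-- arbitrary as any other; B's modular value there is equally unspecified.
def Pre_complement_num_6 (n : Int) : Prop := -64 ≤ n
instance (n : Int) : Decidable (Pre_complement_num_6 n) := by unfold Pre_complement_num_6; infer_instance
def pvWitness_complement_num_6 : Int := (-7)

def Spec_complement_num_6 (n : Int) (out : Int) : Prop := out = complement_num_6_alt n
instance (n : Int) (out : Int) : Decidable (Spec_complement_num_6 n out) := by unfold Spec_complement_num_6; infer_instance

-- ===== CLAIM (what is proved, stated in full; the proofs are below) =====
def Claim_equal_complement_num_6 : Prop := ∀ (n : Int), Dom_complement_num_6 n → Pre_complement_num_6 n → Spec_complement_num_6 n (complement_num_6 n)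

-- ===== LEMMAS AND PROOFS =====

-- ===== VERDICT (by name: the statement is the Claim_ definition above) =====
theorem complement_num_6_spec : Claim_equal_complement_num_6 := by
  intro n _ hpre
  show complement_num_6 n = complement_num_6_alt n
  by_cases h : n < 0
  · have hpre' : -64 ≤ n := hpre
    interval_cases n <;> decide
  · simp [complement_num_6, complement_num_6_alt, h]
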